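-- pv_equiv track=rewrite | github.com/R4phou/ulb-infoh3000-project | tests/algo_gen.py | sort_by_dominance
-- ===== SOURCE A (Python) =====
-- def is_dominated(ind1, ind2):
--     """Fonction qui return true si ind1 est dominé
--     False ne veut rien dire (si i1 n'est pas dominé, il n'est pas d'office dominant)
--     Args:
--         ind1 (list): score de l'individu 1
--         ind2 (list): score de l'individu 2
--     """
--     return (
--         ind1[0] <= ind2[0]
--         and ind1[1] <= ind2[1]
--         and ind1[2] <= ind2[2]
--         and (ind1[0] < ind2[0] or ind1[1] < ind2[1] or ind1[2] < ind2[2])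
--     )
--
-- def sort_by_dominance(scores_pop):
--     """
--     Trie les scores de la population selon leur dominance de Pareto
--     Renvoie un dictionnaire {it: #domination sur lui}
--     """
--     n = len(scores_pop)
--     dominated_by = {i: 0 for i in range(n)}
--
--     for i1 in range(n):
--         for i2 in range(n):
--             if i1 == i2:
--                 continue
--             if is_dominated(scores_pop[i1], scores_pop[i2]):
--                 dominated_by[i2] += 1
--     return dominated_by
-- ===== SOURCE B (Python) =====
-- def sort_by_dominance(scores_pop):
--     # Group identical score triples once; Pareto-dominance between DISTINCT
--     # triples is plain componentwise <=, so the strictness test disappears.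
--     counts = {}
--     for p in scores_pop:
--         t = (p[0], p[1], p[2])
--         counts[t] = counts.get(t, 0) + 1
--     dominated = {}
--     for t in counts:
--         c = 0
--         for u in counts:
--             if u != t and u[0] <= t[0] and u[1] <= t[1] and u[2] <= t[2]:
--                 c += counts[u]
--         dominated[t] = c
--     return {i: dominated[(p[0], p[1], p[2])] for i, p in enumerate(scores_pop)}
-- ===== Notes on version B (the rewrite author's own statement) =====
-- stated objective: faster
-- what changed: B groups identical score triples into a multiplicity table first and counts Pareto dominance only between distinct triples (strictness is free because the triples are distinct, so the strict-part test disappears), then distributes the counts back to the indices by a dict lookup, instead of A's double loop over all n^2 index pairs with a 6-comparison dominance test per pair; the pairwise work drops from n^2 to d^2 for d distinct triples and the per-pair test is cheaper (tuple comparisons, no strictness clause).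
-- outside the precondition, e.g. on sort_by_dominance([[0, 5], [1, 0, 0]]): A returns {0: 0, 1: 0}, B raises IndexError; on sort_by_dominance([[1]]): A returns {0: 0}, B raises IndexError
import Mathlib
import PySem

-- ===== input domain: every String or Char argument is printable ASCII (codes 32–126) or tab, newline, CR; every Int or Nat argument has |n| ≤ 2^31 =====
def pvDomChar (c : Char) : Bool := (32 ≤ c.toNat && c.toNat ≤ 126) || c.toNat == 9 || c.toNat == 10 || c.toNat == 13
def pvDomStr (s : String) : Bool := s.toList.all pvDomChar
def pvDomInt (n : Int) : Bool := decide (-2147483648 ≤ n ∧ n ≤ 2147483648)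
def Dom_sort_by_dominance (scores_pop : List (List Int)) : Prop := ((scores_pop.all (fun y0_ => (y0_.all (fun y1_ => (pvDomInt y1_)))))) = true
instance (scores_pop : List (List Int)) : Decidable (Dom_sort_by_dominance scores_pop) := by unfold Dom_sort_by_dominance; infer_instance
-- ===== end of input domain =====

-- B groups identical score triples once and counts dominance between the DISTINCT
-- triples only (componentwise ≤, strictness free by distinctness), weighting by
-- multiplicities: an alternative O(d²+n) pass over d distinct triples instead of
-- A's O(n²) pass over all index pairs.

-- ===== PORT A =====
def is_dominated (ind1 ind2 : List Int) : Bool :=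
  decide (PySem.List.pyGetD ind1 0 0 ≤ PySem.List.pyGetD ind2 0 0) &&
  decide (PySem.List.pyGetD ind1 1 0 ≤ PySem.List.pyGetD ind2 1 0) &&
  decide (PySem.List.pyGetD ind1 2 0 ≤ PySem.List.pyGetD ind2 2 0) &&
  (decide (PySem.List.pyGetD ind1 0 0 < PySem.List.pyGetD ind2 0 0) ||
   decide (PySem.List.pyGetD ind1 1 0 < PySem.List.pyGetD ind2 1 0) ||
   decide (PySem.List.pyGetD ind1 2 0 < PySem.List.pyGetD ind2 2 0))

def sort_by_dominance (scores_pop : List (List Int)) : List (Int × Int) :=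
  let n : Int := scores_pop.length
  let init : PySem.Dict Int Int :=
    (PySem.List.pyRange 0 n 1).foldl (fun d i => d.insert i 0) PySem.Dict.empty
  let dominated_by :=
    (PySem.List.pyRange 0 n 1).foldl (fun d i1 =>
      (PySem.List.pyRange 0 n 1).foldl (fun d i2 =>
        if i1 = i2 then d
        else if is_dominated (PySem.List.pyGetD scores_pop i1 [])
                             (PySem.List.pyGetD scores_pop i2 []) then
          d.modify i2 0 (fun x => x + 1)
        else d) d) init
  dominated_by.items

-- ===== PORT B =====
def pvKey (p : List Int) : Int × Int × Int :=
  (PySem.List.pyGetD p 0 0, PySem.List.pyGetD p 1 0, PySem.List.pyGetD p 2 0)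

def sort_by_dominance_alt (scores_pop : List (List Int)) : List (Int × Int) :=
  let counts : PySem.Dict (Int × Int × Int) Int :=
    scores_pop.foldl (fun d p => d.insert (pvKey p) (d.getD (pvKey p) 0 + 1)) PySem.Dict.empty
  let dominated : PySem.Dict (Int × Int × Int) Int :=
    counts.keys.foldl (fun d t =>
      d.insert t (counts.keys.foldl (fun c u =>
        if u ≠ t ∧ u.1 ≤ t.1 ∧ u.2.1 ≤ t.2.1 ∧ u.2.2 ≤ t.2.2 then c + counts.getD u 0
        else c) 0)) PySem.Dict.empty
  ((PySem.List.enumerate scores_pop).foldl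
      (fun d pr => d.insert pr.1 (dominated.getD (pvKey pr.2) 0)) PySem.Dict.empty).items

-- ===== PRECONDITION & SPEC =====
-- Pre_ requires every score to have at least 3 components: on shorter scores the
-- Python A raises IndexError on almost all inputs, though it can still RETURN when
-- every comparison short-circuits before the missing index (an accident of
-- evaluation order) or when there is at most one individual; B raises there.
def Pre_sort_by_dominance (scores_pop : List (List Int)) : Prop :=
  ∀ l ∈ scores_pop, 3 ≤ l.length
instance (scores_pop : List (List Int)) : Decidable (Pre_sort_by_dominance scores_pop) := by
  unfold Pre_sort_by_dominance; infer_instance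
def pvWitness_sort_by_dominance : List (List Int) := [[1, 2, 3], [2, 3, 4], [2, 3, 4]]

def Spec_sort_by_dominance (scores_pop : List (List Int)) (out : List (Int × Int)) : Prop :=
  out = sort_by_dominance_alt scores_pop
instance (scores_pop : List (List Int)) (out : List (Int × Int)) : Decidable (Spec_sort_by_dominance scores_pop out) := by
  unfold Spec_sort_by_dominance; infer_instance

-- ===== CLAIM (what is proved, stated in full; the proofs are below) =====
def Claim_equal_sort_by_dominance : Prop := ∀ (scores_pop : List (List Int)), Dom_sort_by_dominance scores_pop → Pre_sort_by_dominance scores_pop → Spec_sort_by_dominance scores_pop (sort_by_dominance scores_pop)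

-- ===== LEMMAS AND PROOFS =====

-- the Boolean condition B tests between two (distinct) triples
def pvCond (u t : Int × Int × Int) : Bool :=
  decide (u ≠ t ∧ u.1 ≤ t.1 ∧ u.2.1 ≤ t.2.1 ∧ u.2.2 ≤ t.2.2)

-- A's dominance test only reads the first three components, i.e. the keys
theorem is_dominated_eq_cond (p q : List Int) :
    is_dominated p q = pvCond (pvKey p) (pvKey q) := by
  have h : (is_dominated p q = true) ↔ (pvCond (pvKey p) (pvKey q) = true) := by
    simp only [is_dominated, pvCond, pvKey, ne_eq, Prod.mk.injEq, Bool.and_eq_true,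
      Bool.or_eq_true, decide_eq_true_eq, not_and]
    constructor
    · rintro ⟨⟨⟨h1, h2⟩, h3⟩, h4⟩
      refine ⟨?_, h1, h2, h3⟩
      intro e1 e2 e3
      omega
    · rintro ⟨hne, h1, h2, h3⟩
      refine ⟨⟨⟨h1, h2⟩, h3⟩, ?_⟩
      by_contra hc
      push Not at hc
      exact hne (by omega) (by omega) (by omega)
  exact Bool.eq_iff_iff.mpr h

theorem sum_indicator {K : Type} [DecidableEq K] (S : List K) (x : K) (q : K → Bool)
    (hnd : S.Nodup) (hx : x ∈ S) :
    (S.map (fun u => if u = x ∧ q u = true then (1 : Int) else 0)).sum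
      = if q x then 1 else 0 := by
  induction S with
  | nil => cases hx
  | cons b S ih =>
    rcases List.nodup_cons.mp hnd with ⟨hb, hnd'⟩
    simp only [List.map_cons, List.sum_cons]
    by_cases hbx : b = x
    · subst hbx
      have hz : (S.map (fun u => if u = b ∧ q u = true then (1 : Int) else 0)).sum = 0 := by
        apply List.sum_eq_zero
        intro y hy
        rcases List.mem_map.mp hy with ⟨u, hu, rfl⟩
        have hub : u ≠ b := fun h => hb (h ▸ hu)
        simp [hub]
      by_cases hq : q b <;> simp [hz, hq]
    · have hxS : x ∈ S := by
        rcases List.mem_cons.mp hx with h | h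
        · exact absurd h.symm hbx
        · exact h
      rw [ih hnd' hxS]
      simp [hbx]

theorem grouping {K : Type} [DecidableEq K] [BEq K] [LawfulBEq K]
    (m S : List K) (q : K → Bool) (hnd : S.Nodup) (hsub : ∀ x ∈ m, x ∈ S) :
    (S.map (fun u => if q u then (m.count u : Int) else 0)).sum = (m.countP q : Int) := by
  induction m with
  | nil =>
    simp only [List.count_nil, List.countP_nil]
    push_cast
    apply List.sum_eq_zero
    intro y hy
    rcases List.mem_map.mp hy with ⟨u, _, rfl⟩
    by_cases hq : q u <;> simp [hq]
  | cons x m ih =>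
    have hx : x ∈ S := hsub x List.mem_cons_self
    have hsub' : ∀ y ∈ m, y ∈ S := fun y hy => hsub y (List.mem_cons_of_mem _ hy)
    have hsplit : ∀ u : K,
        (if q u then ((x :: m).count u : Int) else 0)
          = (if q u then (m.count u : Int) else 0)
            + (if u = x ∧ q u = true then (1 : Int) else 0) := by
      intro u
      rw [List.count_cons]
      by_cases hq : q u <;> by_cases hux : u = x <;>
        simp [hq, hux] <;>
        first
          | (split_ifs <;> push_cast <;> omega)
          | (exact fun h => hux h.symm)
    calc (S.map (fun u => if q u then ((x :: m).count u : Int) else 0)).sum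
        = (S.map (fun u => (if q u then (m.count u : Int) else 0)
            + (if u = x ∧ q u = true then (1 : Int) else 0))).sum := by
          congr 1; exact List.map_congr_left (fun u _ => hsplit u)
      _ = (S.map (fun u => if q u then (m.count u : Int) else 0)).sum
            + (S.map (fun u => if u = x ∧ q u = true then (1 : Int) else 0)).sum := by
          rw [← List.sum_map_add]
      _ = (m.countP q : Int) + (if q x then 1 else 0) := by
          rw [ih hsub', sum_indicator S x q hnd hx]
      _ = ((x :: m).countP q : Int) := by
          rw [List.countP_cons]
          by_cases hq : q x <;> simp [hq] <;> push_cast <;> ring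

theorem foldl_cond_sum {K : Type} (S : List K) (Q : K → Prop) [DecidablePred Q] (g : K → Int) :
    ∀ c0 : Int, S.foldl (fun c u => if Q u then c + g u else c) c0
      = c0 + (S.map (fun u => if Q u then g u else 0)).sum := by
  induction S with
  | nil => intro c0; simp
  | cons a S ih =>
    intro c0
    by_cases hq : Q a
    · rw [List.foldl_cons, if_pos hq, ih, List.map_cons, List.sum_cons, if_pos hq]; ring
    · rw [List.foldl_cons, if_neg hq, ih, List.map_cons, List.sum_cons, if_neg hq]; ring

theorem countP_and_eq (l : List Int) (p : Int → Bool) (j : Int) :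
    l.countP (fun x => p x && (x == j)) = if p j then l.count j else 0 := by
  induction l with
  | nil => simp [List.count_nil]
  | cons a l ih =>
    rw [List.countP_cons, List.count_cons, ih]
    by_cases haj : a = j
    · subst haj; by_cases hp : p a <;> simp [hp]
    · have : (a == j) = false := by simp [haj]
      by_cases hp : p j <;> simp [this, hp]

theorem count_eq_one_of_nodup_mem {l : List Int} {j : Int} (hnd : l.Nodup) (hj : j ∈ l) :
    l.count j = 1 := by
  exact List.count_eq_one_of_mem hnd hj

-- inner loop of A: getD after the fold
theorem inner_getD (l : List Int) (i1 : Int) (c : Int → Bool) (j : Int) :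
    ∀ d : PySem.Dict Int Int,
    (l.foldl (fun d i2 =>
        if i1 = i2 then d
        else if c i2 then d.modify i2 0 (fun x => x + 1) else d) d).getD j 0
      = d.getD j 0 + (l.countP (fun i2 => (!(i1 == i2)) && c i2 && (i2 == j)) : Int) := by
  induction l with
  | nil => intro d; simp
  | cons a l ih =>
    intro d
    rw [List.foldl_cons, List.countP_cons, ih]
    by_cases h1 : i1 = a
    · simp [h1]
    · by_cases hc : c a
      · rw [if_neg h1, if_pos hc, PySem.Dict.getD_modify]
        by_cases haj : j = a
        · simp [h1, hc, haj]
          ring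
        · have haj' : (a == j) = false := beq_eq_false_iff_ne.mpr (fun h => haj h.symm)
          simp [h1, hc, haj, haj']
      · simp [h1, hc]

-- outer loop of A: getD after the fold
theorem outer_getD (l : List Int) (n : Int) (scores_pop : List (List Int)) (j : Int) :
    ∀ d : PySem.Dict Int Int,
    (l.foldl (fun d i1 =>
        (PySem.List.pyRange 0 n 1).foldl (fun d i2 =>
          if i1 = i2 then d
          else if is_dominated (PySem.List.pyGetD scores_pop i1 [])
                               (PySem.List.pyGetD scores_pop i2 []) then
            d.modify i2 0 (fun x => x + 1)
          else d) d) d).getD j 0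
      = d.getD j 0 + (l.map (fun i1 =>
          ((PySem.List.pyRange 0 n 1).countP (fun i2 => (!(i1 == i2)) &&
            is_dominated (PySem.List.pyGetD scores_pop i1 [])
                         (PySem.List.pyGetD scores_pop i2 []) && (i2 == j)) : Int))).sum := by
  induction l with
  | nil => intro d; simp
  | cons a l ih =>
    intro d
    rw [List.foldl_cons, ih, inner_getD]
    simp only [List.map_cons, List.sum_cons]
    push_cast
    ring

-- keys are preserved by modify at an existing key
theorem keys_modify_of_mem {d : PySem.Dict Int Int} {k : Int} (f : Int → Int)
    (h : k ∈ d.keys) : (d.modify k 0 f).keys = d.keys := by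
  rw [PySem.Dict.keys_modify]
  have hc : d.contains k = true := by
    rw [PySem.Dict.contains_eq_decide_mem_keys]; simp [h]
  simp only [PySem.Dict.keys]
  rw [PySem.Dict.items_insert_of_contains _ _ hc]
  rw [List.map_map]
  apply List.map_congr_left
  intro p _
  by_cases hp : p.1 = k <;> simp [hp]

-- keys are preserved throughout A's inner loop
theorem inner_keys (l : List Int) (i1 : Int) (c : Int → Bool) :
    ∀ d : PySem.Dict Int Int, (∀ x ∈ l, x ∈ d.keys) →
    (l.foldl (fun d i2 =>
        if i1 = i2 then d
        else if c i2 then d.modify i2 0 (fun x => x + 1) else d) d).keys = d.keys := by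
  induction l with
  | nil => intro d _; simp
  | cons a l ih =>
    intro d hmem
    rw [List.foldl_cons]
    by_cases h1 : i1 = a
    · rw [if_pos h1]; exact ih d (fun x hx => hmem x (List.mem_cons_of_mem _ hx))
    · rw [if_neg h1]
      by_cases hc : c a
      · rw [if_pos hc]
        have hk := keys_modify_of_mem (d := d) (k := a) (fun x => x + 1) (hmem a List.mem_cons_self)
        rw [ih _ (fun x hx => by rw [hk]; exact hmem x (List.mem_cons_of_mem _ hx)), hk]
      · rw [if_neg hc]; exact ih d (fun x hx => hmem x (List.mem_cons_of_mem _ hx))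

-- keys are preserved throughout A's outer loop
theorem outer_keys (l : List Int) (n : Int) (scores_pop : List (List Int)) :
    ∀ d : PySem.Dict Int Int, (∀ x, x ∈ PySem.List.pyRange 0 n 1 → x ∈ d.keys) →
    (l.foldl (fun d i1 =>
        (PySem.List.pyRange 0 n 1).foldl (fun d i2 =>
          if i1 = i2 then d
          else if is_dominated (PySem.List.pyGetD scores_pop i1 [])
                               (PySem.List.pyGetD scores_pop i2 []) then
            d.modify i2 0 (fun x => x + 1)
          else d) d) d).keys = d.keys := by
  induction l with
  | nil => intro d _; simp
  | cons a l ih =>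
    intro d hmem
    rw [List.foldl_cons]
    have hk := inner_keys (PySem.List.pyRange 0 n 1) a
      (fun i2 => is_dominated (PySem.List.pyGetD scores_pop a [])
                              (PySem.List.pyGetD scores_pop i2 [])) d hmem
    rw [ih _ (fun x hx => by rw [hk]; exact hmem x hx), hk]

-- the common canonical value: position j carries the number of individuals whose
-- key triple is componentwise ≤ and distinct from the key triple at position j
def pvCanon (xs : List (List Int)) : List (Int × Int) :=
  (PySem.List.pyRange 0 (xs.length : Int) 1).map (fun j =>
    (j, ((xs.map pvKey).countP
          (fun u => (pvCond u (pvKey (PySem.List.pyGetD xs j [])))) : Int)))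

theorem inner_cval (m : List (Int × Int × Int)) (t : Int × Int × Int) :
    ((PySem.Set.ofList m).foldl (fun c u =>
        if u ≠ t ∧ u.1 ≤ t.1 ∧ u.2.1 ≤ t.2.1 ∧ u.2.2 ≤ t.2.2 then c + (m.count u : Int)
        else c) 0)
    = (m.countP (fun u => pvCond u t) : Int) := by
  rw [foldl_cond_sum (PySem.Set.ofList m)
      (fun u => u ≠ t ∧ u.1 ≤ t.1 ∧ u.2.1 ≤ t.2.1 ∧ u.2.2 ≤ t.2.2)
      (fun u => (m.count u : Int)) 0, zero_add]
  have hmc : ((PySem.Set.ofList m).map (fun u =>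
      if u ≠ t ∧ u.1 ≤ t.1 ∧ u.2.1 ≤ t.2.1 ∧ u.2.2 ≤ t.2.2 then (m.count u : Int) else 0))
      = ((PySem.Set.ofList m).map (fun u =>
      if (fun u => pvCond u t) u then (m.count u : Int) else 0)) := by
    apply List.map_congr_left
    intro u _
    by_cases h : u ≠ t ∧ u.1 ≤ t.1 ∧ u.2.1 ≤ t.2.1 ∧ u.2.2 ≤ t.2.2
    · simp [pvCond, h]
    · simp [pvCond, h]
  rw [hmc]
  exact grouping m (PySem.Set.ofList m) (fun u => pvCond u t)
    (PySem.Set.nodup_ofList m) (fun x hx => (PySem.Set.mem_ofList m x).mpr hx)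

theorem A_eq (xs : List (List Int)) : sort_by_dominance xs = pvCanon xs := by
  unfold sort_by_dominance pvCanon
  simp only []
  set R := PySem.List.pyRange 0 (xs.length : Int) 1 with hRdef
  have h_nodupR : R.Nodup := PySem.List.nodup_pyRange_one 0 (xs.length : Int)
  set init := R.foldl (fun d i => d.insert i 0) (PySem.Dict.empty : PySem.Dict Int Int) with hinit
  have h_init_items : init.items = R.map (fun i => (i, (0 : Int))) := by
    have h := PySem.Dict.items_foldl_insert_fresh R (fun i => i) (fun _ => (0 : Int))
      PySem.Dict.empty (fun a _ => PySem.Dict.contains_empty a) (by simpa using h_nodupR)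
    simpa using h
  have h_init_keys : init.keys = R := by
    simp only [PySem.Dict.keys, h_init_items, List.map_map]
    exact List.map_id' R
  have h_init_getD : ∀ j ∈ R, init.getD j 0 = 0 := by
    intro j hj
    exact PySem.Dict.getD_of_mem_items init
      (by rw [h_init_items]; exact List.mem_map.mpr ⟨j, hj, rfl⟩)
      (by rw [h_init_keys]; exact h_nodupR) 0
  have h_keys : (R.foldl (fun d i1 =>
      R.foldl (fun d i2 =>
        if i1 = i2 then d
        else if is_dominated (PySem.List.pyGetD xs i1 [])
                             (PySem.List.pyGetD xs i2 []) then
          d.modify i2 0 (fun x => x + 1)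
        else d) d) init).keys = R := by
    rw [outer_keys R (xs.length : Int) xs init (fun x hx => by rw [h_init_keys]; exact hx)]
    exact h_init_keys
  rw [PySem.Dict.items_eq_map_keys _ (by rw [h_keys]; exact h_nodupR) 0, h_keys]
  apply List.map_congr_left
  intro j hj
  have hjb := PySem.List.mem_pyRange_one.mp hj
  refine Prod.ext rfl ?_
  show (_ : PySem.Dict Int Int).getD j 0 = _
  rw [outer_getD R (xs.length : Int) xs j init, h_init_getD j hj, zero_add]
  -- each outer pass contributes 0 or 1 to slot j
  have hw : ∀ i1 ∈ R,
      ((R.countP (fun i2 => (!(i1 == i2)) &&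
          is_dominated (PySem.List.pyGetD xs i1 [])
                       (PySem.List.pyGetD xs i2 []) && (i2 == j)) : Int))
      = if ((!(i1 == j)) &&
          is_dominated (PySem.List.pyGetD xs i1 [])
                       (PySem.List.pyGetD xs j [])) = true then (1 : Int) else 0 := by
    intro i1 _
    rw [countP_and_eq R (fun i2 => (!(i1 == i2)) &&
          is_dominated (PySem.List.pyGetD xs i1 []) (PySem.List.pyGetD xs i2 [])) j]
    rw [count_eq_one_of_nodup_mem h_nodupR hj]
    by_cases h : ((!(i1 == j)) &&
        is_dominated (PySem.List.pyGetD xs i1 []) (PySem.List.pyGetD xs j [])) = true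
    · rw [if_pos h, if_pos h]; norm_num
    · rw [if_neg h, if_neg h]; norm_num
  rw [List.map_congr_left hw, PySem.List.sum_map_ite_one_zero]
  -- drop the i1 ≠ j conjunct: a point never dominates itself
  have hdrop : R.countP (fun i1 => (!(i1 == j)) &&
      is_dominated (PySem.List.pyGetD xs i1 []) (PySem.List.pyGetD xs j []))
      = R.countP (fun i1 =>
          (pvCond (pvKey (PySem.List.pyGetD xs i1 []))
                         (pvKey (PySem.List.pyGetD xs j [])))) := by
    apply List.countP_congr
    intro i1 _
    rw [is_dominated_eq_cond]
    by_cases hij : i1 = j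
    · subst hij
      have : pvCond (pvKey (PySem.List.pyGetD xs i1 []))
                    (pvKey (PySem.List.pyGetD xs i1 [])) = false := by simp [pvCond]
      simp [this]
    · have : (i1 == j) = false := beq_eq_false_iff_ne.mpr hij
      simp [this]
  rw [hdrop]
  -- re-index: counting positions equals counting mapped keys
  have hreindex : R.countP (fun i1 =>
        (pvCond (pvKey (PySem.List.pyGetD xs i1 []))
                       (pvKey (PySem.List.pyGetD xs j []))))
      = (xs.map pvKey).countP (fun u =>
          (pvCond u (pvKey (PySem.List.pyGetD xs j [])))) := by
    calc R.countP (fun i1 =>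
          (pvCond (pvKey (PySem.List.pyGetD xs i1 []))
                         (pvKey (PySem.List.pyGetD xs j []))))
        = ((R.map (fun i => PySem.List.pyGetD xs i [])).map pvKey).countP (fun u =>
            (pvCond u (pvKey (PySem.List.pyGetD xs j [])))) := by
          rw [List.countP_map, List.countP_map]
          rfl
      _ = (xs.map pvKey).countP (fun u =>
            (pvCond u (pvKey (PySem.List.pyGetD xs j [])))) := by
          rw [PySem.List.map_pyGetD_pyRange_zero']
  rw [hreindex]

theorem B_eq (xs : List (List Int)) : sort_by_dominance_alt xs = pvCanon xs := by
  unfold sort_by_dominance_alt pvCanon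
  simp only []
  have hc : xs.foldl (fun d p => d.insert (pvKey p) (d.getD (pvKey p) 0 + 1))
      (PySem.Dict.empty : PySem.Dict (Int × Int × Int) Int)
      = PySem.Dict.counter (xs.map pvKey) := by
    have h1 := List.foldl_map (f := pvKey)
      (g := fun (d : PySem.Dict (Int × Int × Int) Int) t => d.insert t (d.getD t 0 + 1))
      (l := xs) (init := PySem.Dict.empty)
    exact h1.symm.trans (PySem.Dict.foldl_insert_getD_add_one_eq_counter _)
  rw [hc]
  simp only [PySem.Dict.keys_counter, PySem.Dict.getD_counter, inner_cval]
  set m := xs.map pvKey with hm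
  set S := PySem.Set.ofList m with hS
  set D := S.foldl (fun d t =>
      d.insert t ((m.countP (fun u => (pvCond u t)) : Int))) PySem.Dict.empty with hD
  have h_nodupS : S.Nodup := PySem.Set.nodup_ofList m
  have h_D_items : D.items = S.map (fun t => (t, (m.countP (fun u => (pvCond u t)) : Int))) := by
    have h := PySem.Dict.items_foldl_insert_fresh S (fun t => t)
      (fun t => (m.countP (fun u => (pvCond u t)) : Int))
      PySem.Dict.empty (fun a _ => PySem.Dict.contains_empty a) (by simpa using h_nodupS)
    simpa using h
  have h_D_keys : D.keys = S := by
    simp only [PySem.Dict.keys, h_D_items, List.map_map]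
    exact List.map_id' S
  have h_D_getD : ∀ t ∈ S, D.getD t 0 = (m.countP (fun u => (pvCond u t)) : Int) := by
    intro t ht
    exact PySem.Dict.getD_of_mem_items D
      (by rw [h_D_items]; exact List.mem_map.mpr ⟨t, ht, rfl⟩)
      (by rw [h_D_keys]; exact h_nodupS) 0
  have h_final := PySem.Dict.items_foldl_insert_fresh (PySem.List.enumerate xs) (fun pr => pr.1)
    (fun pr => D.getD (pvKey pr.2) 0) PySem.Dict.empty (fun a _ => PySem.Dict.contains_empty _)
    (by rw [PySem.List.map_fst_enumerate]; simpa using PySem.List.nodup_pyRange_one 0 (0 + (xs.length : Int)))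
  rw [show (PySem.Dict.empty : PySem.Dict Int Int).items = [] from rfl,
    List.nil_append] at h_final
  rw [h_final, PySem.List.enumerate_eq_map_pyRange xs ([] : List Int), List.map_map,
    PySem.List.len_eq]
  apply List.map_congr_left
  intro j hj
  have hjb := PySem.List.mem_pyRange_one.mp hj
  have hmem : PySem.List.pyGetD xs j [] ∈ xs := by
    rw [PySem.List.pyGetD_of_nonneg xs [] hjb.1]
    have hlt : j.toNat < xs.length := by omega
    rw [List.getD_eq_getElem xs [] hlt]
    exact List.getElem_mem hlt
  have ht : pvKey (PySem.List.pyGetD xs j []) ∈ S := by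
    rw [hS, PySem.Set.mem_ofList, hm]
    exact List.mem_map.mpr ⟨_, hmem, rfl⟩
  show (j, D.getD (pvKey (PySem.List.pyGetD xs j [])) 0) = _
  rw [h_D_getD _ ht]

-- ===== VERDICT (by name: the statement is the Claim_ definition above) =====
theorem sort_by_dominance_spec : Claim_equal_sort_by_dominance := by
  intro scores_pop _ _
  unfold Spec_sort_by_dominance
  rw [A_eq, B_eq]
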